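-- pv_equiv track=rewrite | github.com/shuwenhe/slate | scripts/auto_commit_push.py | summarize_paths
-- ===== SOURCE A (Python) =====
-- def summarize_paths(paths):
--     labels = []
--     mapping = [
--         ("slatec_s/", "S compiler"),
--         ("slatec/", "bootstrap compiler"),
--         ("examples/", "examples"),
--         ("docs/", "docs"),
--         ("scripts/", "tooling"),
--     ]
--     for prefix, label in mapping:
--         if any(path.startswith(prefix) for path in paths):
--             labels.append(label)
--     if "README.md" in paths:
--         labels.append("README")
--     if "pyproject.toml" in paths:
--         labels.append("project config")
--     if ".gitignore" in paths:
--         labels.append("gitignore")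
--     if not labels:
--         labels.append("project files")
--     return labels
-- ===== SOURCE B (Python) =====
-- def summarize_paths(paths):
--     mapping = [
--         ("slatec_s/", "S compiler"),
--         ("slatec/", "bootstrap compiler"),
--         ("examples/", "examples"),
--         ("docs/", "docs"),
--         ("scripts/", "tooling"),
--     ]
--     specials = [
--         ("README.md", "README"),
--         ("pyproject.toml", "project config"),
--         (".gitignore", "gitignore"),
--     ]
--     matched = set()
--     seen = set()
--     for path in paths:
--         for prefix, label in mapping:
--             if path.startswith(prefix):
--                 matched.add(label)
--         if path in ("README.md", "pyproject.toml", ".gitignore"):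
--             seen.add(path)
--     labels = [label for _, label in mapping if label in matched]
--     labels += [label for name, label in specials if name in seen]
--     return labels if labels else ["project files"]
-- ===== Notes on version B (the rewrite author's own statement) =====
-- stated objective: alternative
-- what changed: Replaces A's five any()-scans of paths plus three membership scans with a single pass over paths that records matched labels and exact-name hits in sets, then rebuilds the output from the fixed mapping order.
import Mathlib
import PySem

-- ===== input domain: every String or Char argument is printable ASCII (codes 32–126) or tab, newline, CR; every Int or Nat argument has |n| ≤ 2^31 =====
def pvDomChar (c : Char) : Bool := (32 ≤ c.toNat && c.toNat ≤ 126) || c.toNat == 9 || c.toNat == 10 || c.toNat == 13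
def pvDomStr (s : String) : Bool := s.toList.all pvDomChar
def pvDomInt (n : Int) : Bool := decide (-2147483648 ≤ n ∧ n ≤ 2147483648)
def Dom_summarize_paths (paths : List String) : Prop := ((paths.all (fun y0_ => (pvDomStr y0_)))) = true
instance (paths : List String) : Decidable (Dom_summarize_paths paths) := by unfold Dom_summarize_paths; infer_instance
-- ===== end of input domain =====

-- B makes a single pass over paths collecting matched labels / exact-name hits in sets,
-- instead of A's five any()-scans plus three membership scans (alternative decomposition, same asymptotic cost).

-- ===== PORT A =====
def pvMapping : List (String × String) :=
  [("slatec_s/", "S compiler"), ("slatec/", "bootstrap compiler"),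
   ("examples/", "examples"), ("docs/", "docs"), ("scripts/", "tooling")]

def summarize_paths (paths : List String) : List String :=
  -- for prefix, label in mapping: if any(path.startswith(prefix) ...): labels.append(label)
  let labels := pvMapping.foldl
    (fun labels pl =>
      if paths.any (fun path => PySem.Str.startswith path pl.1) then labels ++ [pl.2] else labels)
    []
  let labels := if paths.contains "README.md" then labels ++ ["README"] else labels
  let labels := if paths.contains "pyproject.toml" then labels ++ ["project config"] else labels
  let labels := if paths.contains ".gitignore" then labels ++ ["gitignore"] else labels
  if labels = [] then ["project files"] else labels

-- ===== PORT B =====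
def pvSpecials : List (String × String) :=
  [("README.md", "README"), ("pyproject.toml", "project config"), (".gitignore", "gitignore")]

-- one iteration of B's loop body: record every matched prefix label and any exact-name hit
def pvStep (st : PySem.Set String × PySem.Set String) (path : String) :
    PySem.Set String × PySem.Set String :=
  (pvMapping.foldl
     (fun m pl => if PySem.Str.startswith path pl.1 then PySem.Set.add m pl.2 else m) st.1,
   if ["README.md", "pyproject.toml", ".gitignore"].contains path
     then PySem.Set.add st.2 path else st.2)

def summarize_paths_alt (paths : List String) : List String :=
  let st := paths.foldl pvStep (PySem.Set.empty, PySem.Set.empty)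
  let labels := (pvMapping.filter (fun pl => PySem.Set.contains st.1 pl.2)).map (·.2)
  let labels := labels ++ (pvSpecials.filter (fun pl => PySem.Set.contains st.2 pl.1)).map (·.2)
  if labels.isEmpty then ["project files"] else labels

-- ===== PRECONDITION & SPEC =====
def Spec_summarize_paths (paths : List String) (out : List String) : Prop := out = summarize_paths_alt paths
instance (paths : List String) (out : List String) : Decidable (Spec_summarize_paths paths out) := by unfold Spec_summarize_paths; infer_instance

-- ===== CLAIM (what is proved, stated in full; the proofs are below) =====
def Claim_equal_summarize_paths : Prop := ∀ (paths : List String), Dom_summarize_paths paths → Spec_summarize_paths paths (summarize_paths paths)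

-- ===== LEMMAS AND PROOFS =====

theorem pv_contains_add (s : PySem.Set String) (x y : String) :
    PySem.Set.contains (PySem.Set.add s x) y = (PySem.Set.contains s y || x == y) := by
  by_cases hxy : x = y
  · subst hxy
    simp [PySem.Set.add, PySem.Set.contains]
    split_ifs with hx <;> simp_all
  · have hb : (x == y) = false := beq_eq_false_iff_ne.mpr hxy
    simp only [PySem.Set.add, PySem.Set.contains, hb, Bool.or_false]
    split_ifs with hx <;> simp_all [Ne.symm hxy]

-- the matched-set component of B's fold, characterised per mapping entry
theorem pv_matched_contains (paths : List String) (st : PySem.Set String × PySem.Set String)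
    (pre lab : String) (h : (pre, lab) ∈ pvMapping) :
    PySem.Set.contains (paths.foldl pvStep st).1 lab
      = (PySem.Set.contains st.1 lab || paths.any (fun p => PySem.Str.startswith p pre)) := by
  induction paths generalizing st with
  | nil => simp
  | cons p ps ih =>
    rw [List.foldl_cons, ih, List.any_cons]
    have hstep : PySem.Set.contains (pvStep st p).1 lab
        = (PySem.Set.contains st.1 lab || PySem.Str.startswith p pre) := by
      simp only [pvMapping, List.mem_cons, List.not_mem_nil, or_false, Prod.mk.injEq] at h
      rcases h with ⟨h1, h2⟩ | ⟨h1, h2⟩ | ⟨h1, h2⟩ | ⟨h1, h2⟩ | ⟨h1, h2⟩ <;> subst h1 <;> subst h2 <;>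
        · simp only [pvStep, pvMapping, List.foldl_cons, List.foldl_nil]
          split_ifs <;> simp_all [pv_contains_add]
    rw [hstep, Bool.or_assoc]

-- the exact-name component of B's fold, characterised per special name
theorem pv_seen_contains (paths : List String) (st : PySem.Set String × PySem.Set String)
    (n : String) (hn : n ∈ ["README.md", "pyproject.toml", ".gitignore"]) :
    PySem.Set.contains (paths.foldl pvStep st).2 n
      = (PySem.Set.contains st.2 n || paths.contains n) := by
  induction paths generalizing st with
  | nil => simp
  | cons p ps ih =>
    rw [List.foldl_cons, ih, List.contains_cons]
    have hstep : PySem.Set.contains (pvStep st p).2 n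
        = (PySem.Set.contains st.2 n || p == n) := by
      simp only [pvStep]
      split_ifs with hp
      · rw [pv_contains_add]
      · have hpn : (p == n) = false := by
          simp at hp
          simp only [beq_eq_false_iff_ne]
          rintro rfl
          fin_cases hn <;> simp_all
        rw [hpn, Bool.or_false]
    have hc : (p == n) = (n == p) := by
      by_cases h : p = n
      · subst h; rfl
      · rw [beq_eq_false_iff_ne.mpr h, beq_eq_false_iff_ne.mpr (Ne.symm h)]
    rw [hstep, hc]
    simp [Bool.or_comm, Bool.or_left_comm, Bool.or_assoc]

-- ===== VERDICT (by name: the statement is the Claim_ definition above) =====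
theorem summarize_paths_spec : Claim_equal_summarize_paths := by
  intro paths _
  show summarize_paths paths = summarize_paths_alt paths
  have h1 : PySem.Set.contains (List.foldl pvStep (PySem.Set.empty, PySem.Set.empty) paths).1 "S compiler" = paths.any (fun p => PySem.Str.startswith p "slatec_s/") := by
    rw [pv_matched_contains paths (PySem.Set.empty, PySem.Set.empty) "slatec_s/" "S compiler" (by decide)]
    simp [PySem.Set.contains, PySem.Set.empty]
  have h2 : PySem.Set.contains (List.foldl pvStep (PySem.Set.empty, PySem.Set.empty) paths).1 "bootstrap compiler" = paths.any (fun p => PySem.Str.startswith p "slatec/") := by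
    rw [pv_matched_contains paths (PySem.Set.empty, PySem.Set.empty) "slatec/" "bootstrap compiler" (by decide)]
    simp [PySem.Set.contains, PySem.Set.empty]
  have h3 : PySem.Set.contains (List.foldl pvStep (PySem.Set.empty, PySem.Set.empty) paths).1 "examples" = paths.any (fun p => PySem.Str.startswith p "examples/") := by
    rw [pv_matched_contains paths (PySem.Set.empty, PySem.Set.empty) "examples/" "examples" (by decide)]
    simp [PySem.Set.contains, PySem.Set.empty]
  have h4 : PySem.Set.contains (List.foldl pvStep (PySem.Set.empty, PySem.Set.empty) paths).1 "docs" = paths.any (fun p => PySem.Str.startswith p "docs/") := by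
    rw [pv_matched_contains paths (PySem.Set.empty, PySem.Set.empty) "docs/" "docs" (by decide)]
    simp [PySem.Set.contains, PySem.Set.empty]
  have h5 : PySem.Set.contains (List.foldl pvStep (PySem.Set.empty, PySem.Set.empty) paths).1 "tooling" = paths.any (fun p => PySem.Str.startswith p "scripts/") := by
    rw [pv_matched_contains paths (PySem.Set.empty, PySem.Set.empty) "scripts/" "tooling" (by decide)]
    simp [PySem.Set.contains, PySem.Set.empty]
  have h6 : PySem.Set.contains (List.foldl pvStep (PySem.Set.empty, PySem.Set.empty) paths).2 "README.md" = paths.contains "README.md" := by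
    rw [pv_seen_contains paths (PySem.Set.empty, PySem.Set.empty) "README.md" (by decide)]
    simp [PySem.Set.contains, PySem.Set.empty]
  have h7 : PySem.Set.contains (List.foldl pvStep (PySem.Set.empty, PySem.Set.empty) paths).2 "pyproject.toml" = paths.contains "pyproject.toml" := by
    rw [pv_seen_contains paths (PySem.Set.empty, PySem.Set.empty) "pyproject.toml" (by decide)]
    simp [PySem.Set.contains, PySem.Set.empty]
  have h8 : PySem.Set.contains (List.foldl pvStep (PySem.Set.empty, PySem.Set.empty) paths).2 ".gitignore" = paths.contains ".gitignore" := by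
    rw [pv_seen_contains paths (PySem.Set.empty, PySem.Set.empty) ".gitignore" (by decide)]
    simp [PySem.Set.contains, PySem.Set.empty]
  simp only [summarize_paths, summarize_paths_alt, pvMapping, pvSpecials,
    List.foldl_cons, List.foldl_nil, List.filter_cons, List.filter_nil,
    h1, h2, h3, h4, h5, h6, h7, h8]
  generalize (paths.any fun p => PySem.Str.startswith p "slatec_s/") = a1
  generalize (paths.any fun p => PySem.Str.startswith p "slatec/") = a2
  generalize (paths.any fun p => PySem.Str.startswith p "examples/") = a3
  generalize (paths.any fun p => PySem.Str.startswith p "docs/") = a4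
  generalize (paths.any fun p => PySem.Str.startswith p "scripts/") = a5
  generalize (paths.contains "README.md") = r
  generalize (paths.contains "pyproject.toml") = c
  generalize (paths.contains ".gitignore") = g
  cases a1 <;> cases a2 <;> cases a3 <;> cases a4 <;> cases a5 <;> cases r <;> cases c <;> cases g <;> rfl
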